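-- pv_equiv track=rewrite | github.com/etsubeta132/comptetive-programming | 18-Jun-2024/Satisfiability of Equality Equations 169852.py | equationsPossible
-- ===== SOURCE A (Python) =====
-- from typing import List
--
-- def equationsPossible(equations: List[str]) -> bool:
--     variables = set()
--
--     for variable in equations:
--         var1, var2 = variable[0], variable[-1]
--         variables.add(var1)
--         variables.add(var2)
--
--     equal_var = {var : var for var in variables}
--     rank = {var: 0 for var in variables}
--
--     def find(var):
--         if equal_var[var] == var:
--             return var
--
--         return find(equal_var[var])
--
--     def union(var1, var2):
--         equal1 = find(var1)
--         equal2 = find(var2)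
--
--         if equal1 != equal2:
--
--             if rank[equal1] > rank[equal2]:
--                 equal_var[equal2] = equal1
--
--             elif rank[equal2] > rank[equal1]:
--                 equal_var[equal1] = equal2
--
--             else:
--                 equal_var[equal2] = equal1
--                 rank[equal1] += 1
--
--     result = True
--     for equality in equations:
--         if equality[1] == "=":
--             var1, var2 = equality[0], equality[-1]
--             union(var1, var2)
--
--
--     for equality in equations:
--         var1, var2 = equality[0], equality[-1]
--
--         if equality[1] == "!" and find(var1) == find(var2):
--             return False
--
--     return True
-- ===== SOURCE B (Python) =====
-- def equationsPossible(equations):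
--     # Flat component-label map instead of union-find: merge by relabeling.
--     label = {}
--     for eq in equations:
--         label.setdefault(eq[0], eq[0])
--         label.setdefault(eq[-1], eq[-1])
--     for eq in equations:
--         if eq[1] == '=':
--             la, lb = label[eq[0]], label[eq[-1]]
--             if la != lb:
--                 for v in label:
--                     if label[v] == lb:
--                         label[v] = la
--     return all(not (eq[1] == '!' and label[eq[0]] == label[eq[-1]])
--                for eq in equations)
-- ===== Notes on version B (the rewrite author's own statement) =====
-- stated objective: simpler
-- what changed: Replaces the recursive union-find (find with parent-chain recursion plus union-by-rank) by a flat component-label dictionary that is merged by relabeling every variable of one component, then a single all() scan over the inequalities.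
import Mathlib
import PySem

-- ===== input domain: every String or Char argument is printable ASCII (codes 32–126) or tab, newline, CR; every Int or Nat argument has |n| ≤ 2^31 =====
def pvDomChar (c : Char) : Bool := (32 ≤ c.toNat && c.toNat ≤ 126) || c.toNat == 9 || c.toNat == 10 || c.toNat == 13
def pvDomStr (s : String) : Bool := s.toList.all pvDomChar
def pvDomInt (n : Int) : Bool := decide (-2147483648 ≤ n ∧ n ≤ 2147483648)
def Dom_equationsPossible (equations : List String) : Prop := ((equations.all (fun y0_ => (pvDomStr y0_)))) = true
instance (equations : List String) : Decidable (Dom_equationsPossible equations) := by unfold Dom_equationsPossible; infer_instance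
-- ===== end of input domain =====

-- B replaces A's recursive union-find (find + union by rank) with a flat component-label
-- map merged by relabeling; objective: simpler (no recursion, no rank bookkeeping).

-- ===== PORT A =====

-- s[i] for i ∈ {0, -1, 1}; total wrapper (Pre_ guarantees pyGet? = some on admitted inputs)
def pvCh (s : String) (i : Int) : Char := (PySem.Str.pyGet? s i).getD ' '

-- Python's `find` is unbounded recursion on the parent map; `fuel` (= len(equations)+1 at
-- every call site) only makes it total: the proofs show the root is reached within fuel.
-- `equal_var[var]` is ported as getD var var: every var looked up is a key of the dict.
def pvFindA (fuel : Nat) (d : PySem.Dict Char Char) (x : Char) : Char :=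
  match fuel with
  | 0 => x
  | n + 1 => if d.getD x x = x then x else pvFindA n d (d.getD x x)

def pvUnionA (fuel : Nat) (st : PySem.Dict Char Char × PySem.Dict Char Int)
    (v1 v2 : Char) : PySem.Dict Char Char × PySem.Dict Char Int :=
  let e1 := pvFindA fuel st.1 v1
  let e2 := pvFindA fuel st.1 v2
  if e1 ≠ e2 then
    if st.2.getD e1 0 > st.2.getD e2 0 then (st.1.insert e2 e1, st.2)
    else if st.2.getD e2 0 > st.2.getD e1 0 then (st.1.insert e1 e2, st.2)
    else (st.1.insert e2 e1, st.2.modify e1 0 (· + 1))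
  else st

def pvStepA (fuel : Nat) (st : PySem.Dict Char Char × PySem.Dict Char Int)
    (eq : String) : PySem.Dict Char Char × PySem.Dict Char Int :=
  if pvCh eq 1 = '=' then pvUnionA fuel st (pvCh eq 0) (pvCh eq (-1)) else st

-- A's second loop with its early `return False`
def pvCheckA (fuel : Nat) (d : PySem.Dict Char Char) : List String → Bool
  | [] => true
  | e :: rest =>
    if pvCh e 1 = '!' ∧ pvFindA fuel d (pvCh e 0) = pvFindA fuel d (pvCh e (-1)) then false
    else pvCheckA fuel d rest

def equationsPossible (equations : List String) : Bool :=
  let vars : PySem.Set Char :=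
    equations.foldl (fun s eq => PySem.Set.add (PySem.Set.add s (pvCh eq 0)) (pvCh eq (-1)))
      PySem.Set.empty
  let equalVar : PySem.Dict Char Char :=
    vars.foldl (fun d v => d.insert v v) PySem.Dict.empty
  let rank : PySem.Dict Char Int :=
    vars.foldl (fun d v => d.insert v 0) PySem.Dict.empty
  let st := equations.foldl (pvStepA (equations.length + 1)) (equalVar, rank)
  pvCheckA (equations.length + 1) st.1 equations

-- ===== PORT B =====

-- B's inner `for v in label: if label[v] == lb: label[v] = la` rewrites values in place,
-- keeping keys and their order: exactly a map over the items.
def pvMerge (d : PySem.Dict Char Char) (la lb : Char) : PySem.Dict Char Char :=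
  PySem.Dict.mk (d.items.map (fun p => (p.1, if p.2 = lb then la else p.2)))

def pvStepB (lab : PySem.Dict Char Char) (eq : String) : PySem.Dict Char Char :=
  if pvCh eq 1 = '=' then
    let la := lab.getD (pvCh eq 0) (pvCh eq 0)
    let lb := lab.getD (pvCh eq (-1)) (pvCh eq (-1))
    if la ≠ lb then pvMerge lab la lb else lab
  else lab

def pvLabel0 (equations : List String) : PySem.Dict Char Char :=
  equations.foldl
    (fun d eq => (d.setdefault (pvCh eq 0) (pvCh eq 0)).setdefault (pvCh eq (-1)) (pvCh eq (-1)))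
    PySem.Dict.empty

def equationsPossible_alt (equations : List String) : Bool :=
  let lab := equations.foldl pvStepB (pvLabel0 equations)
  equations.all (fun e =>
    !(decide (pvCh e 1 = '!') &&
      decide (lab.getD (pvCh e 0) (pvCh e 0) = lab.getD (pvCh e (-1)) (pvCh e (-1)))))

-- ===== PRECONDITION & SPEC =====

-- Pre_ excludes exactly the inputs on which A raises IndexError: an equation string of
-- length < 2 (A reads s[0], s[-1] and s[1]).
def Pre_equationsPossible (equations : List String) : Prop :=
  ∀ s ∈ equations, 2 ≤ s.toList.length
instance (equations : List String) : Decidable (Pre_equationsPossible equations) := by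
  unfold Pre_equationsPossible; infer_instance

def pvWitness_equationsPossible : List String := ["a==b", "b!=c"]

def Spec_equationsPossible (equations : List String) (out : Bool) : Prop :=
  out = equationsPossible_alt equations
instance (equations : List String) (out : Bool) : Decidable (Spec_equationsPossible equations out) := by
  unfold Spec_equationsPossible; infer_instance

-- ===== CLAIM (what is proved, stated in full; the proofs are below) =====
def Claim_equal_equationsPossible : Prop :=
  ∀ (equations : List String), Dom_equationsPossible equations →
    Pre_equationsPossible equations →
    Spec_equationsPossible equations (equationsPossible equations)

-- ===== LEMMAS AND PROOFS =====

-- `RootAll d k`: from every node, k steps of the parent map reach a root.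
def pvRootAll (d : PySem.Dict Char Char) (k : Nat) : Prop :=
  ∀ x, d.getD (pvFindA k d x) (pvFindA k d x) = pvFindA k d x

theorem pvFindA_zero (d : PySem.Dict Char Char) (x : Char) : pvFindA 0 d x = x := rfl

theorem pvFindA_succ (n : Nat) (d : PySem.Dict Char Char) (x : Char) :
    pvFindA (n + 1) d x = if d.getD x x = x then x else pvFindA n d (d.getD x x) := rfl

theorem pvFind_of_root (d : PySem.Dict Char Char) (x : Char) (h : d.getD x x = x) :
    ∀ n, pvFindA n d x = x := by
  intro n; cases n <;> simp [pvFindA, h]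

theorem pvFind_stable (k : Nat) :
    ∀ (n : Nat) (d : PySem.Dict Char Char) (x : Char), k ≤ n →
      d.getD (pvFindA k d x) (pvFindA k d x) = pvFindA k d x →
      pvFindA n d x = pvFindA k d x := by
  induction k with
  | zero =>
    intro n d x _ h
    simp only [pvFindA] at h ⊢
    exact pvFind_of_root d x h n
  | succ k ih =>
    intro n d x hkn h
    obtain ⟨m, rfl⟩ : ∃ m, n = m + 1 := ⟨n - 1, by omega⟩
    by_cases hx : d.getD x x = x
    · simp [pvFindA, hx]
    · simp only [pvFindA, hx, if_false] at h ⊢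
      exact ih m d (d.getD x x) (by omega) h

theorem pvFind_insert (r1 r2 : Char) (hne : r1 ≠ r2) :
    ∀ (k : Nat) (d : PySem.Dict Char Char) (x : Char),
      d.getD r1 r1 = r1 → d.getD r2 r2 = r2 →
      d.getD (pvFindA k d x) (pvFindA k d x) = pvFindA k d x →
      pvFindA (k + 1) (d.insert r2 r1) x =
        (if pvFindA k d x = r2 then r1 else pvFindA k d x) := by
  intro k
  induction k with
  | zero =>
    intro d x hr1 hr2 hx
    rw [pvFindA_zero] at hx
    by_cases hxr2 : x = r2
    · subst hxr2
      have hval : (d.insert x r1).getD x x = r1 := by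
        rw [PySem.Dict.getD_insert, if_pos rfl]
      rw [pvFindA_succ, hval, if_neg hne, pvFindA_zero, pvFindA_zero, if_pos rfl]
    · have hval : (d.insert r2 r1).getD x x = d.getD x x := by
        rw [PySem.Dict.getD_insert, if_neg hxr2]
      rw [pvFindA_succ, hval, hx, if_pos rfl, pvFindA_zero, if_neg hxr2]
  | succ k ih =>
    intro d x hr1 hr2 hx
    by_cases hxr2 : x = r2
    · subst hxr2
      have hval : (d.insert x r1).getD x x = r1 := by
        rw [PySem.Dict.getD_insert, if_pos rfl]
      have hroot1 : (d.insert x r1).getD r1 r1 = r1 := by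
        rw [PySem.Dict.getD_insert, if_neg hne]; exact hr1
      rw [pvFindA_succ, hval, if_neg hne, pvFind_of_root _ r1 hroot1 (k + 1),
        pvFind_of_root d x hr2 (k + 1), if_pos rfl]
    · have hval : (d.insert r2 r1).getD x x = d.getD x x := by
        rw [PySem.Dict.getD_insert, if_neg hxr2]
      by_cases hpx : d.getD x x = x
      · rw [pvFindA_succ, hval, hpx, if_pos rfl, pvFind_of_root d x hpx (k + 1),
          if_neg hxr2]
      · have hrw : pvFindA (k + 1) d x = pvFindA k d (d.getD x x) := by
          rw [pvFindA_succ k, if_neg hpx]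
        rw [hrw] at hx
        rw [pvFindA_succ (k + 1), hval, if_neg hpx, hrw]
        exact ih d (d.getD x x) hr1 hr2 hx

theorem pvRootAll_insert (d : PySem.Dict Char Char) (k : Nat) (r1 r2 : Char)
    (hne : r1 ≠ r2) (hr1 : d.getD r1 r1 = r1) (hr2 : d.getD r2 r2 = r2)
    (h : pvRootAll d k) : pvRootAll (d.insert r2 r1) (k + 1) := by
  intro x
  rw [pvFind_insert r1 r2 hne k d x hr1 hr2 (h x)]
  by_cases hx : pvFindA k d x = r2
  · simp only [hx]
    rw [PySem.Dict.getD_insert]; simp [hne, hr1]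
  · simp only [hx]
    rw [PySem.Dict.getD_insert]
    simp [hx, h x]

-- merged-partition characterisation of a relabeling
theorem pvMerge_classes (B : Char → Char) (b1 b2 : Char) (x y : Char) :
    ((if B x = b2 then b1 else B x) = (if B y = b2 then b1 else B y)) ↔
      (B x = B y ∨ ((B x = b1 ∨ B x = b2) ∧ (B y = b1 ∨ B y = b2))) := by
  split_ifs with h1 h2 h2
  · simp [h1, h2]
  · constructor
    · intro h; exact Or.inr ⟨Or.inr h1, Or.inl h.symm⟩
    · rintro (h | ⟨_, hy1 | hy2⟩)
      · exact absurd (h ▸ h1) h2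
      · exact hy1.symm
      · exact absurd hy2 h2
  · constructor
    · intro h; exact Or.inr ⟨Or.inl h, Or.inr h2⟩
    · rintro (h | ⟨hx1 | hx2, _⟩)
      · exact absurd (h.trans h2) h1
      · exact hx1
      · exact absurd hx2 h1
  · constructor
    · intro h; exact Or.inl h
    · rintro (h | ⟨hx1 | hx2, hy1 | hy2⟩)
      · exact h
      · exact hx1.trans hy1.symm
      · exact absurd hy2 h2
      · exact absurd hx2 h1
      · exact absurd hx2 h1

theorem pvMerge_iff (A B : Char → Char) (a1 a2 b1 b2 : Char)
    (h : ∀ x y, A x = A y ↔ B x = B y)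
    (ha1 : ∀ x, A x = a1 ↔ B x = b1) (ha2 : ∀ x, A x = a2 ↔ B x = b2)
    (x y : Char) :
    ((if A x = a2 then a1 else A x) = (if A y = a2 then a1 else A y)) ↔
      ((if B x = b2 then b1 else B x) = (if B y = b2 then b1 else B y)) := by
  rw [pvMerge_classes A a1 a2, pvMerge_classes B b1 b2]
  rw [h x y, ha1 x, ha2 x, ha1 y, ha2 y]

-- the swapped orientation of the union (A may link either root under the other)
theorem pvMerge_iff_swap (A B : Char → Char) (a1 a2 b1 b2 : Char)
    (h : ∀ x y, A x = A y ↔ B x = B y)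
    (ha1 : ∀ x, A x = a1 ↔ B x = b1) (ha2 : ∀ x, A x = a2 ↔ B x = b2)
    (x y : Char) :
    ((if A x = a1 then a2 else A x) = (if A y = a1 then a2 else A y)) ↔
      ((if B x = b2 then b1 else B x) = (if B y = b2 then b1 else B y)) := by
  rw [pvMerge_classes A a2 a1, pvMerge_classes B b1 b2]
  rw [h x y, ha1 x, ha2 x, ha1 y, ha2 y]
  tauto

-- get?/getD/keys of pvMerge
theorem pvMerge_get? (l : List (Char × Char)) (la lb x : Char) :
    (PySem.Dict.mk (l.map (fun p => (p.1, if p.2 = lb then la else p.2)))).get? x =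
      ((PySem.Dict.mk l).get? x).map (fun v => if v = lb then la else v) := by
  induction l with
  | nil => simp [PySem.Dict.get?]
  | cons p rest ih =>
    obtain ⟨k, v⟩ := p
    simp only [List.map_cons, PySem.Dict.get?_mk_cons]
    by_cases hk : (k == x) = true
    · simp [hk]
    · simp [hk, ih]

theorem pvMerge_keys (d : PySem.Dict Char Char) (la lb : Char) :
    (pvMerge d la lb).keys = d.keys := by
  simp only [pvMerge, PySem.Dict.keys]
  simp

theorem pvMerge_getD (d : PySem.Dict Char Char) (la lb x : Char)
    (hlb : lb ∈ d.keys) :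
    (pvMerge d la lb).getD x x = (if d.getD x x = lb then la else d.getD x x) := by
  have hmk : PySem.Dict.mk d.items = d := rfl
  have h := pvMerge_get? d.items la lb x
  rw [hmk] at h
  rcases hx : d.get? x with _ | v
  · have hxk : x ∉ d.keys := by
      rw [← PySem.Dict.get?_eq_none_iff_not_mem_keys]; exact hx
    have hgd : d.getD x x = x := by rw [PySem.Dict.getD_eq_get?_getD, hx]; rfl
    have hxlb : x ≠ lb := fun hxe => hxk (hxe ▸ hlb)
    rw [PySem.Dict.getD_eq_get?_getD, pvMerge, h, hx]
    simp [hgd, hxlb]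
  · rw [PySem.Dict.getD_eq_get?_getD, pvMerge, h, hx,
      PySem.Dict.getD_eq_get?_getD, hx]
    rfl

-- initial states
theorem pvD0_getD (l : List Char) :
    ∀ (d : PySem.Dict Char Char), (∀ x, d.getD x x = x) →
      ∀ x, (l.foldl (fun d v => d.insert v v) d).getD x x = x := by
  induction l with
  | nil => intro d h x; exact h x
  | cons v rest ih =>
    intro d h x
    refine ih (d.insert v v) (fun y => ?_) x
    rw [PySem.Dict.getD_insert]
    split_ifs with hy
    · exact hy.symm
    · exact h y

theorem pvSetdefault_getD_id (d : PySem.Dict Char Char) (c x : Char) :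
    (d.setdefault c c).getD x x = d.getD x x := by
  by_cases hx : x = c
  · subst hx; exact PySem.Dict.getD_setdefault_self d x x x
  · rw [PySem.Dict.getD_eq_get?_getD, PySem.Dict.get?_setdefault_of_ne d c hx,
      ← PySem.Dict.getD_eq_get?_getD]

theorem pvLabel0_getD (equations : List String) :
    ∀ (d : PySem.Dict Char Char), (∀ x, d.getD x x = x) →
      ∀ x, (equations.foldl
        (fun d eq => (d.setdefault (pvCh eq 0) (pvCh eq 0)).setdefault (pvCh eq (-1)) (pvCh eq (-1)))
        d).getD x x = x := by
  induction equations with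
  | nil => intro d h x; exact h x
  | cons e rest ih =>
    intro d h x
    exact ih _ (fun y => by rw [pvSetdefault_getD_id, pvSetdefault_getD_id]; exact h y) x

theorem pvMem_keys_setdefault_mono (d : PySem.Dict Char Char) (k v x : Char)
    (h : x ∈ d.keys) : x ∈ (d.setdefault k v).keys := by
  rw [PySem.Dict.keys_setdefault]
  split_ifs <;> simp [h]

theorem pvMem_keys_setdefault_self (d : PySem.Dict Char Char) (k v : Char) :
    k ∈ (d.setdefault k v).keys := by
  rw [PySem.Dict.keys_setdefault]
  split_ifs with hc
  · rw [← PySem.Dict.contains_iff_mem_keys]; exact hc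
  · simp

theorem pvLabel0_keys_mono (equations : List String) :
    ∀ (d : PySem.Dict Char Char) (x : Char), x ∈ d.keys →
      x ∈ (equations.foldl
        (fun d eq => (d.setdefault (pvCh eq 0) (pvCh eq 0)).setdefault (pvCh eq (-1)) (pvCh eq (-1)))
        d).keys := by
  induction equations with
  | nil => intro d x h; exact h
  | cons e rest ih =>
    intro d x h
    exact ih _ x (pvMem_keys_setdefault_mono _ _ _ _ (pvMem_keys_setdefault_mono _ _ _ _ h))

theorem pvLabel0_keys (equations : List String) :
    ∀ (d : PySem.Dict Char Char), ∀ eq ∈ equations,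
      pvCh eq 0 ∈ (equations.foldl
        (fun d eq => (d.setdefault (pvCh eq 0) (pvCh eq 0)).setdefault (pvCh eq (-1)) (pvCh eq (-1)))
        d).keys ∧
      pvCh eq (-1) ∈ (equations.foldl
        (fun d eq => (d.setdefault (pvCh eq 0) (pvCh eq 0)).setdefault (pvCh eq (-1)) (pvCh eq (-1)))
        d).keys := by
  induction equations with
  | nil => intro d eq h; cases h
  | cons e rest ih =>
    intro d eq heq
    rcases List.mem_cons.mp heq with rfl | hmem
    · constructor
      · exact pvLabel0_keys_mono rest _ _
          (pvMem_keys_setdefault_mono _ _ _ _ (pvMem_keys_setdefault_self d _ _))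
      · exact pvLabel0_keys_mono rest _ _ (pvMem_keys_setdefault_self _ _ _)
    · exact ih _ eq hmem

-- the main simulation invariant over the two folds
theorem pvLoop_inv (N : Nat) :
    ∀ (rest : List String) (i : Nat) (d : PySem.Dict Char Char)
      (rk : PySem.Dict Char Int) (lab : PySem.Dict Char Char),
      i + rest.length < N →
      pvRootAll d i →
      (∀ x y, pvFindA i d x = pvFindA i d y ↔ lab.getD x x = lab.getD y y) →
      (∀ x, lab.getD x x ∈ lab.keys ∨ lab.getD x x = x) →
      (∀ eq ∈ rest, pvCh eq 0 ∈ lab.keys ∧ pvCh eq (-1) ∈ lab.keys) →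
      ∃ j, j < N ∧ pvRootAll (rest.foldl (pvStepA N) (d, rk)).1 j ∧
        ∀ x y, pvFindA j (rest.foldl (pvStepA N) (d, rk)).1 x =
               pvFindA j (rest.foldl (pvStepA N) (d, rk)).1 y ↔
          (rest.foldl pvStepB lab).getD x x = (rest.foldl pvStepB lab).getD y y := by
  intro rest
  induction rest with
  | nil =>
    intro i d rk lab hiN hroot hiff _ _
    exact ⟨i, by simpa using hiN, hroot, hiff⟩
  | cons e rest ih =>
    intro i d rk lab hiN hroot hiff hvk hkeys
    simp only [List.foldl_cons]
    by_cases hEq : pvCh e 1 = '='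
    · -- union / merge step
      set v1 := pvCh e 0 with hv1
      set v2 := pvCh e (-1) with hv2
      have hiNle : i ≤ N := by simp at hiN; omega
      have hfN : ∀ x, pvFindA N d x = pvFindA i d x := fun x =>
        pvFind_stable i N d x hiNle (hroot x)
      set R := fun x => pvFindA i d x with hR
      set L := fun x => lab.getD x x with hL
      have hiff' : ∀ x y, R x = R y ↔ L x = L y := hiff
      have hstepA : pvStepA N (d, rk) e = pvUnionA N (d, rk) v1 v2 := by
        simp only [pvStepA, if_pos hEq]
        exact rfl
      have hstepB : pvStepB lab e =
          (if L v1 ≠ L v2 then pvMerge lab (L v1) (L v2) else lab) := by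
        simp only [pvStepB, if_pos hEq]
        exact rfl
      by_cases hsame : R v1 = R v2
      · -- no-op on both sides
        have hLsame : L v1 = L v2 := (hiff' v1 v2).mp hsame
        have hA : pvStepA N (d, rk) e = (d, rk) := by
          rw [hstepA]
          simp only [pvUnionA, hfN v1, hfN v2]
          rw [if_neg (by simpa using hsame)]
        have hB : pvStepB lab e = lab := by rw [hstepB, if_neg (by simpa using hLsame)]
        rw [hA, hB]
        exact ih i d rk lab (by simp at hiN ⊢; omega) hroot hiff hvk
          (fun eq h => hkeys eq (List.mem_cons_of_mem e h))
      · -- a real merge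
        have hLne : L v1 ≠ L v2 := fun h => hsame ((hiff' v1 v2).mpr h)
        have hB : pvStepB lab e = pvMerge lab (L v1) (L v2) := by
          rw [hstepB, if_pos hLne]
        have hk1 : v1 ∈ lab.keys := (hkeys e (by simp)).1
        have hk2 : v2 ∈ lab.keys := (hkeys e (by simp)).2
        have hLv1k : L v1 ∈ lab.keys := by
          rcases hvk v1 with h | h
          · exact h
          · show lab.getD v1 v1 ∈ lab.keys
            rw [h]; exact hk1
        have hLv2k : L v2 ∈ lab.keys := by
          rcases hvk v2 with h | h
          · exact h
          · show lab.getD v2 v2 ∈ lab.keys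
            rw [h]; exact hk2
        have hr1 : d.getD (R v1) (R v1) = R v1 := hroot v1
        have hr2 : d.getD (R v2) (R v2) = R v2 := hroot v2
        have hgd : ∀ x, (pvMerge lab (L v1) (L v2)).getD x x =
            (if L x = L v2 then L v1 else L x) := fun x =>
          pvMerge_getD lab (L v1) (L v2) x hLv2k
        have hvk' : ∀ x, (pvMerge lab (L v1) (L v2)).getD x x ∈
              (pvMerge lab (L v1) (L v2)).keys ∨
            (pvMerge lab (L v1) (L v2)).getD x x = x := by
          intro x
          rw [hgd x, pvMerge_keys]
          split_ifs with h
          · exact Or.inl hLv1k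
          · exact hvk x
        have hkeys' : ∀ eq ∈ rest, pvCh eq 0 ∈ (pvMerge lab (L v1) (L v2)).keys ∧
            pvCh eq (-1) ∈ (pvMerge lab (L v1) (L v2)).keys := by
          intro eq h; rw [pvMerge_keys]; exact hkeys eq (by simp [h])
        -- the three rank branches produce one of two inserts
        have hmain : ∀ (d' : PySem.Dict Char Char) (rk' : PySem.Dict Char Int),
            (d' = d.insert (R v2) (R v1) ∨ d' = d.insert (R v1) (R v2)) →
            ∃ j, j < N ∧ pvRootAll (rest.foldl (pvStepA N) (d', rk')).1 j ∧
              ∀ x y, pvFindA j (rest.foldl (pvStepA N) (d', rk')).1 x =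
                     pvFindA j (rest.foldl (pvStepA N) (d', rk')).1 y ↔
                (rest.foldl pvStepB (pvMerge lab (L v1) (L v2))).getD x x =
                (rest.foldl pvStepB (pvMerge lab (L v1) (L v2))).getD y y := by
          intro d' rk' hd'
          have hroot' : pvRootAll d' (i + 1) := by
            rcases hd' with rfl | rfl
            · exact pvRootAll_insert d i (R v1) (R v2) hsame hr1 hr2 hroot
            · exact pvRootAll_insert d i (R v2) (R v1) (Ne.symm hsame) hr2 hr1 hroot
          have hiff'' : ∀ x y, pvFindA (i+1) d' x = pvFindA (i+1) d' y ↔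
              (pvMerge lab (L v1) (L v2)).getD x x =
              (pvMerge lab (L v1) (L v2)).getD y y := by
            intro x y
            rw [hgd x, hgd y]
            rcases hd' with rfl | rfl
            · rw [pvFind_insert (R v1) (R v2) hsame i d x hr1 hr2 (hroot x),
                pvFind_insert (R v1) (R v2) hsame i d y hr1 hr2 (hroot y)]
              exact pvMerge_iff R L (R v1) (R v2) (L v1) (L v2) hiff'
                (fun z => hiff' z v1) (fun z => hiff' z v2) x y
            · rw [pvFind_insert (R v2) (R v1) (Ne.symm hsame) i d x hr2 hr1 (hroot x),
                pvFind_insert (R v2) (R v1) (Ne.symm hsame) i d y hr2 hr1 (hroot y)]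
              exact pvMerge_iff_swap R L (R v1) (R v2) (L v1) (L v2) hiff'
                (fun z => hiff' z v1) (fun z => hiff' z v2) x y
          exact ih (i + 1) d' rk' (pvMerge lab (L v1) (L v2))
            (by simp at hiN ⊢; omega) hroot' hiff'' hvk' hkeys'
        rw [hstepA, hB]
        simp only [pvUnionA, hfN v1, hfN v2]
        rw [if_pos (by simpa using hsame)]
        split_ifs with h1 h2
        · exact hmain _ _ (Or.inl rfl)
        · exact hmain _ _ (Or.inr rfl)
        · exact hmain _ _ (Or.inl rfl)
    · -- skipped equation on both sides
      have hA : pvStepA N (d, rk) e = (d, rk) := by simp [pvStepA, hEq]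
      have hB : pvStepB lab e = lab := by simp [pvStepB, hEq]
      rw [hA, hB]
      exact ih i d rk lab (by simp at hiN ⊢; omega) hroot hiff hvk
        (fun eq h => hkeys eq (List.mem_cons_of_mem e h))

-- the two final scans agree pointwise
theorem pvCheck_eq (N : Nat) (d : PySem.Dict Char Char) (lab : PySem.Dict Char Char)
    (h : ∀ a b, pvFindA N d a = pvFindA N d b ↔ lab.getD a a = lab.getD b b) :
    ∀ (l : List String), pvCheckA N d l = l.all (fun e =>
      !(decide (pvCh e 1 = '!') &&
        decide (lab.getD (pvCh e 0) (pvCh e 0) = lab.getD (pvCh e (-1)) (pvCh e (-1))))) := by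
  intro l
  induction l with
  | nil => rfl
  | cons e rest ih =>
    simp only [pvCheckA, List.all_cons]
    by_cases hc : pvCh e 1 = '!' ∧ pvFindA N d (pvCh e 0) = pvFindA N d (pvCh e (-1))
    · rw [if_pos hc]
      have : lab.getD (pvCh e 0) (pvCh e 0) = lab.getD (pvCh e (-1)) (pvCh e (-1)) :=
        (h _ _).mp hc.2
      simp [hc.1, this]
    · rw [if_neg hc, ih]
      rcases Decidable.not_and_iff_or_not.mp hc with hc1 | hc2
      · simp [hc1]
      · have : ¬ lab.getD (pvCh e 0) (pvCh e 0) = lab.getD (pvCh e (-1)) (pvCh e (-1)) :=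
          fun hl => hc2 ((h _ _).mpr hl)
        simp [this]

-- ===== VERDICT (by name: the statement is the Claim_ definition above) =====
theorem equationsPossible_spec : Claim_equal_equationsPossible := by
  intro equations _hdom _hpre
  unfold Spec_equationsPossible equationsPossible equationsPossible_alt
  set N := equations.length + 1 with hN
  set vars : PySem.Set Char :=
    equations.foldl (fun s eq => PySem.Set.add (PySem.Set.add s (pvCh eq 0)) (pvCh eq (-1)))
      PySem.Set.empty with hvars
  set d0 : PySem.Dict Char Char := vars.foldl (fun d v => d.insert v v) PySem.Dict.empty with hd0
  set rk0 : PySem.Dict Char Int := vars.foldl (fun d v => d.insert v 0) PySem.Dict.empty with hrk0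
  set lab0 := pvLabel0 equations with hlab0
  have hd0getD : ∀ x, d0.getD x x = x := by
    intro x
    exact pvD0_getD vars PySem.Dict.empty (fun y => PySem.Dict.getD_empty y y) x
  have hlab0getD : ∀ x, lab0.getD x x = x := by
    intro x
    exact pvLabel0_getD equations PySem.Dict.empty (fun y => PySem.Dict.getD_empty y y) x
  have hroot0 : pvRootAll d0 0 := by
    intro x; simp only [pvFindA]; exact hd0getD x
  have hiff0 : ∀ x y, pvFindA 0 d0 x = pvFindA 0 d0 y ↔ lab0.getD x x = lab0.getD y y := by
    intro x y; simp only [pvFindA]; rw [hlab0getD x, hlab0getD y]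
  have hvk0 : ∀ x, lab0.getD x x ∈ lab0.keys ∨ lab0.getD x x = x := fun x =>
    Or.inr (hlab0getD x)
  have hkeys0 : ∀ eq ∈ equations, pvCh eq 0 ∈ lab0.keys ∧ pvCh eq (-1) ∈ lab0.keys :=
    pvLabel0_keys equations PySem.Dict.empty
  obtain ⟨j, hjN, hrootj, hiffj⟩ :=
    pvLoop_inv N equations 0 d0 rk0 lab0 (by omega) hroot0 hiff0 hvk0 hkeys0
  have hfinal : ∀ a b,
      pvFindA N (equations.foldl (pvStepA N) (d0, rk0)).1 a =
      pvFindA N (equations.foldl (pvStepA N) (d0, rk0)).1 b ↔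
      (equations.foldl pvStepB lab0).getD a a = (equations.foldl pvStepB lab0).getD b b := by
    intro a b
    rw [pvFind_stable j N _ a (le_of_lt hjN) (hrootj a),
      pvFind_stable j N _ b (le_of_lt hjN) (hrootj b)]
    exact hiffj a b
  exact pvCheck_eq N _ _ hfinal equations
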